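-- pv_equiv track=rewrite | github.com/pulsar2105/Zebra | scr/compiler/parser.py | search_min_priority
-- ===== SOURCE A (Python) =====
-- def determine_lower_para_influences(tokens):
--     parentheses_influence = 0
--     influences = []
--
--     for t in tokens:
--         if t == "(":
--             parentheses_influence += 1
--             influences.append(parentheses_influence)
--         elif t == ")":
--             influences.append(parentheses_influence)
--             parentheses_influence -= 1
--         else:
--             influences.append(parentheses_influence)
--
--     # if the level of influence of the brackets is greater than 0
--     # ask to remove the extra brackets again
--     if min(influences) > 0:
--         # don't remove brackets if there is comma in there
--         if min(influences) == 1: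
--             for i in range(len(tokens)):
--                 if tokens[i] == "," and influences[i] == min(influences):
--                     return tokens, min(influences), influences
--
--         tokens = tokens[1:-1]
--         return determine_lower_para_influences(tokens)
--
--     return tokens, min(influences), influences
--
-- def search_min_priority(tokens, operators, operators_priority):
--     tokens, min_para_influence, influences = determine_lower_para_influences(tokens)
--
--     # check if there are any operators left
--     good = False
--     for token in tokens:
--         if token in operators:
--             good = True
--     if not good:
--         return None, -1
--
--     # the lowest priority operator is sought
--     for operators in operators_priority:
--         for i in range(len(tokens)):
--             for operator in operators:
--                 if tokens[len(tokens) - 1 - i] in operators: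
--                     if tokens[len(tokens) - 1 - i] == operator and influences[len(tokens) - 1 - i] == min_para_influence:
--                         return operator, len(tokens) - 1 - i
-- ===== SOURCE B (Python) =====
-- def search_min_priority(tokens, operators, operators_priority):
--     def influences_of(ts):
--         infl = []
--         lvl = 0
--         for t in ts:
--             if t == "(":
--                 lvl += 1
--                 infl.append(lvl)
--             elif t == ")":
--                 infl.append(lvl)
--                 lvl -= 1
--             else:
--                 infl.append(lvl)
--         return infl
--
--     infl = influences_of(tokens)
--     # strip outer bracket layers iteratively; when min(infl) > 0 the first token
--     # is "(", so the stripped slice's influences are the old ones shifted by -1.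
--     while True:
--         m = min(infl)
--         if m <= 0:
--             break
--         if m == 1 and any(t == "," and v == 1 for t, v in zip(tokens, infl)):
--             break
--         tokens = tokens[1:-1]
--         infl = [v - 1 for v in infl[1:-1]]
--
--     if not any(t in operators for t in tokens):
--         return None, -1
--
--     rank = {}
--     for r, group in enumerate(operators_priority):
--         for op in group:
--             rank.setdefault(op, r)
--
--     best = None
--     for pos, (t, v) in enumerate(zip(tokens, infl)):
--         if v == m and t in rank:
--             r = rank[t]
--             if best is None or r <= best[0]:
--                 best = (r, t, pos)
--     if best is None:
--         return None
--     return best[1], best[2]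
-- ===== Notes on version B (the rewrite author's own statement) =====
-- stated objective: faster
-- what changed: B replaces A's triple-nested right-to-left operator search (for each priority group, for each position, for each operator in the group) by a priority dict built once plus a single scan keeping the best (lowest-rank, rightmost) candidate, and strips outer bracket layers iteratively by shifting the influence list by -1 instead of recomputing it in a recursive call.
import Mathlib
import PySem

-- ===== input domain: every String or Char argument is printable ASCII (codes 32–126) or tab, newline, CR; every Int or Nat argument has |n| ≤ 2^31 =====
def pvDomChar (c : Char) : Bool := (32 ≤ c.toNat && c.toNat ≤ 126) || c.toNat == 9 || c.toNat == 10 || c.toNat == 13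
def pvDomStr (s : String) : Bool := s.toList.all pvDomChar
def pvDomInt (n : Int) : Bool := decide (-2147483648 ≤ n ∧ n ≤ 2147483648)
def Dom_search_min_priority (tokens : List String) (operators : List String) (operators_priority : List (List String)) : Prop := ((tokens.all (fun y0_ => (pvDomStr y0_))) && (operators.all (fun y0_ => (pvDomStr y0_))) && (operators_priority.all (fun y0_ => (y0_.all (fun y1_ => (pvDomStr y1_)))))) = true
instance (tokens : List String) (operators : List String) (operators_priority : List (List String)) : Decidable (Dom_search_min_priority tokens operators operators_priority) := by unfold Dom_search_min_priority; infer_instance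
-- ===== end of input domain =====

-- B replaces A's triple-nested right-to-left operator scan by a dict of priorities
-- built once plus a single scan, and strips bracket layers by shifting the
-- influence list instead of recomputing it recursively.

-- ===== PORT A =====

-- the influence-accumulating loop of determine_lower_para_influences
def pvInfl : Int → List String → List Int
  | _, [] => []
  | lvl, t :: ts =>
    if t = "(" then (lvl + 1) :: pvInfl (lvl + 1) ts
    else if t = ")" then lvl :: pvInfl (lvl - 1) ts
    else lvl :: pvInfl lvl ts

-- port of determine_lower_para_influences; none = the ValueError of min([]) (outside Pre_).
-- The Nat fuel is only a structural-termination guard: each recursive call strips at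
-- least one token, so fuel = tokens.length + 1 is never exhausted.
def pvDetermineF : Nat → List String → Option (List String × Int × List Int)
  | 0, _ => none
  | fuel + 1, tokens =>
    let infl := pvInfl 0 tokens
    match PySem.List.min? infl (fun x => x) with
    | none => none
    | some m =>
      if 0 < m then
        if m == 1 && (PySem.List.pyRange 0 (tokens.length : Int) 1).any
            (fun i => PySem.List.pyGetD tokens i "" == "," && PySem.List.pyGetD infl i 0 == m) then
          some (tokens, m, infl)
        else pvDetermineF fuel (PySem.List.slice tokens (some 1) (some (-1)))
      else some (tokens, m, infl)

def pvDetermine (tokens : List String) : Option (List String × Int × List Int) :=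
  pvDetermineF (tokens.length + 1) tokens

-- the innermost 'for operator in operators' loop (indices are in range: pyGetD is exact)
def pvFindOp (toks : List String) (infl : List Int) (m : Int) (group : List String) (pos : Int) :
    List String → Option (Option String × Int)
  | [] => none
  | op :: rest =>
    if group.contains (PySem.List.pyGetD toks pos "") then
      if PySem.List.pyGetD toks pos "" == op && PySem.List.pyGetD infl pos 0 == m then
        some (some op, pos)
      else pvFindOp toks infl m group pos rest
    else pvFindOp toks infl m group pos rest

-- 'for i in range(len(tokens))' with early return
def pvScanGroup (toks : List String) (infl : List Int) (m : Int) (group : List String) :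
    List Int → Option (Option String × Int)
  | [] => none
  | i :: is =>
    match pvFindOp toks infl m group ((toks.length : Int) - 1 - i) group with
    | some r => some r
    | none => pvScanGroup toks infl m group is

-- 'for operators in operators_priority' with early return
def pvScanGroups (toks : List String) (infl : List Int) (m : Int) :
    List (List String) → Option (Option String × Int)
  | [] => none
  | g :: gs =>
    match pvScanGroup toks infl m g (PySem.List.pyRange 0 (toks.length : Int) 1) with
    | some r => some r
    | none => pvScanGroups toks infl m gs

def search_min_priority (tokens : List String) (operators : List String) (operators_priority : List (List String)) : Option (Option String × Int) :=
  match pvDetermine tokens with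
  | none => none
  | some (toks, m, infl) =>
    let good := toks.foldl (fun good token => if operators.contains token then true else good) false
    if good = false then some (none, -1)
    else pvScanGroups toks infl m operators_priority

-- ===== PORT B =====

-- iterative outer-bracket stripping: the stripped slice's influences are the old
-- ones shifted by -1 (B's list comprehension); none = min([]) (outside Pre_).
-- The Nat fuel is only a structural-termination guard (fuel = length + 1 suffices).
def pvStripBF : Nat → List String → List Int → Option (List String × Int × List Int)
  | 0, _, _ => none
  | fuel + 1, tokens, infl =>
    match PySem.List.min? infl (fun x => x) with
    | none => none
    | some m =>
      if m ≤ 0 then some (tokens, m, infl)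
      else if m == 1 && (tokens.zip infl).any (fun p => p.1 == "," && p.2 == 1) then
        some (tokens, m, infl)
      else pvStripBF fuel (PySem.List.slice tokens (some 1) (some (-1)))
                     ((PySem.List.slice infl (some 1) (some (-1))).map (fun v => v - 1))

def pvStripB (tokens : List String) (infl : List Int) : Option (List String × Int × List Int) :=
  pvStripBF (infl.length + 1) tokens infl

-- rank.setdefault(op, r) over enumerate(operators_priority)
def pvBuildRank : PySem.Dict String Int → Int → List (List String) → PySem.Dict String Int
  | d, _, [] => d
  | d, r, g :: gs => pvBuildRank (g.foldl (fun d op => PySem.Dict.setdefault d op r) d) (r + 1) gs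

-- single left-to-right scan keeping the best (lowest rank, rightmost) candidate
def pvScanB (rank : PySem.Dict String Int) (m : Int) :
    List (String × Int) → Int → Option (Int × String × Int) → Option (Int × String × Int)
  | [], _, best => best
  | (t, v) :: ps, pos, best =>
    let best' :=
      if v == m && PySem.Dict.contains rank t then
        match PySem.Dict.get? rank t with
        | some r =>
          match best with
          | none => some (r, t, pos)
          | some b => if r ≤ b.1 then some (r, t, pos) else best
        | none => best
      else best
    pvScanB rank m ps (pos + 1) best'

def search_min_priority_alt (tokens : List String) (operators : List String) (operators_priority : List (List String)) : Option (Option String × Int) :=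
  match pvStripB tokens (pvInfl 0 tokens) with
  | none => none
  | some (toks, m, infl) =>
    if toks.any (fun t => operators.contains t) = false then some (none, -1)
    else
      let rank := pvBuildRank PySem.Dict.empty 0 operators_priority
      match pvScanB rank m (toks.zip infl) 0 none with
      | none => none
      | some b => some (some b.2.1, b.2.2)

-- ===== PRECONDITION & SPEC =====

-- Pre_ excludes exactly the inputs on which A raises (ValueError of min([]) when
-- the bracket stripping empties the token list, e.g. tokens = [] or ["(", ")"]):
-- it holds iff some stripping stage j stops (its minimal influence is ≤ j, or it
-- is j+1 with a comma at that level) while its slice tokens[j:len-j] is nonempty.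
-- nesting level of position i, read off the input directly: opening brackets up
-- to and including i minus closing brackets strictly before i
def pvLevel (tokens : List String) (i : Nat) : Int :=
  ((tokens.take (i + 1)).count "(" : Int) - ((tokens.take i).count ")" : Int)

def pvStopAt (tokens : List String) (j : Nat) : Bool :=
  (List.range tokens.length).any (fun i =>
    decide (j ≤ i) && decide (i < tokens.length - j) &&
    (decide (pvLevel tokens i ≤ (j : Int)) ||
     (tokens.getD i "" == "," && pvLevel tokens i == (j : Int) + 1)))

def Pre_search_min_priority (tokens : List String) (operators : List String) (operators_priority : List (List String)) : Prop :=
  ((List.range tokens.length).any (fun j => decide (2 * j < tokens.length) && pvStopAt tokens j)) = true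

instance (tokens : List String) (operators : List String) (operators_priority : List (List String)) : Decidable (Pre_search_min_priority tokens operators operators_priority) := by
  unfold Pre_search_min_priority; infer_instance

def pvWitness_search_min_priority : List String × List String × List (List String) :=
  (["a", "+", "b"], ["+"], [["+"]])

def Spec_search_min_priority (tokens : List String) (operators : List String) (operators_priority : List (List String)) (out : Option (Option String × Int)) : Prop := out = search_min_priority_alt tokens operators operators_priority
instance (tokens : List String) (operators : List String) (operators_priority : List (List String)) (out : Option (Option String × Int)) : Decidable (Spec_search_min_priority tokens operators operators_priority out) := by unfold Spec_search_min_priority; infer_instance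

-- ===== CLAIM (what is proved, stated in full; the proofs are below) =====
def Claim_equal_search_min_priority : Prop := ∀ (tokens : List String) (operators : List String) (operators_priority : List (List String)), Dom_search_min_priority tokens operators operators_priority → Pre_search_min_priority tokens operators operators_priority → Spec_search_min_priority tokens operators operators_priority (search_min_priority tokens operators operators_priority)

-- ===== LEMMAS AND PROOFS =====

-- The equivalence in fact holds for all inputs (on the raising inputs both ports
-- return none); we prove it unconditionally and specialise at the end.

lemma pvInfl_length (lvl : Int) (ts : List String) : (pvInfl lvl ts).length = ts.length := by
  induction ts generalizing lvl with
  | nil => simp [pvInfl]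
  | cons t ts ih => simp only [pvInfl]; split_ifs <;> simp [ih]

-- xs[1:-1] shortens a nonempty list (termination of the bracket stripping)
lemma pvSlice_len_lt {α : Type} (xs : List α) (h : xs ≠ []) :
    (PySem.List.slice xs (some 1) (some (-1))).length < xs.length := by
  cases xs with
  | nil => simp at h
  | cons a t =>
    simp [PySem.List.length_slice, PySem.List.clampIdx]
    split_ifs <;> omega


-- ---- Step 1: the two bracket-stripping loops agree ----

lemma pvInfl_cons (lvl : Int) (t : String) (ts : List String) :
    pvInfl lvl (t :: ts)
      = (if t = "(" then lvl + 1 else lvl)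
        :: pvInfl (if t = "(" then lvl + 1 else if t = ")" then lvl - 1 else lvl) ts := by
  simp only [pvInfl]; split_ifs <;> rfl

lemma pvInfl_shift (ts : List String) (lvl : Int) :
    pvInfl lvl ts = (pvInfl 0 ts).map (fun v => v + lvl) := by
  induction ts generalizing lvl with
  | nil => simp [pvInfl]
  | cons t ts ih =>
    rw [pvInfl_cons lvl t ts, pvInfl_cons 0 t ts, List.map_cons,
      ih (if t = "(" then lvl + 1 else if t = ")" then lvl - 1 else lvl),
      ih (if t = "(" then (0 : Int) + 1 else if t = ")" then 0 - 1 else 0), List.map_map]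
    congr 1
    · split_ifs <;> omega
    · exact List.map_congr_left (fun v _ => by simp only [Function.comp_apply]; split_ifs <;> omega)

lemma pvInfl_dropLast (ts : List String) (lvl : Int) :
    pvInfl lvl ts.dropLast = (pvInfl lvl ts).dropLast := by
  induction ts generalizing lvl with
  | nil => simp [pvInfl]
  | cons t ts ih =>
    cases ts with
    | nil => rw [pvInfl_cons]; simp [pvInfl]
    | cons t2 ts2 =>
      have hne : ∀ lvl', pvInfl lvl' (t2 :: ts2) ≠ [] := by
        intro lvl' h
        have := pvInfl_length lvl' (t2 :: ts2)
        rw [h] at this; simp at this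
      rw [show (t :: t2 :: ts2).dropLast = t :: (t2 :: ts2).dropLast from rfl]
      rw [pvInfl_cons lvl t, pvInfl_cons lvl t, ih, List.dropLast_cons_of_ne_nil (hne _)]

lemma pvSlice_cons {α : Type} (a : α) (t : List α) :
    PySem.List.slice (a :: t) (some 1) (some (-1)) = t.dropLast := by
  simp [PySem.List.slice, PySem.List.clampIdx, List.dropLast_eq_take, Nat.min_def]
  split_ifs <;> omega

lemma pvHead_paren (tokens : List String) (m : Int)
    (h : PySem.List.min? (pvInfl 0 tokens) (fun x => x) = some m) (hm : 0 < m) :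
    ∃ rest, tokens = "(" :: rest := by
  cases tokens with
  | nil =>
    exact absurd (((PySem.List.min?_eq_none_iff (pvInfl 0 ([] : List String))
      (fun x => x)).mpr rfl).symm.trans h) (by simp)
  | cons t rest =>
    by_cases ht : t = "("
    · exact ⟨rest, by rw [ht]⟩
    · have h0 : ∃ l, pvInfl 0 (t :: rest) = 0 :: l := by
        by_cases ht2 : t = ")" <;> simp [pvInfl, ht, ht2]
      obtain ⟨l, hl⟩ := h0
      have := PySem.List.min?_isMin h 0 (by rw [hl]; exact List.mem_cons_self)
      omega

lemma pvCommaAny (tokens : List String) (infl : List Int) (hl : infl.length = tokens.length) :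
    ((PySem.List.pyRange 0 (tokens.length : Int) 1).any
      (fun i => PySem.List.pyGetD tokens i "" == "," && PySem.List.pyGetD infl i 0 == 1))
      = (tokens.zip infl).any (fun p => p.1 == "," && p.2 == 1) := by
  rw [PySem.List.pyRange_zero_nat, List.any_map]
  rw [Bool.eq_iff_iff]
  simp only [List.any_eq_true, List.mem_range, Function.comp_apply,
    PySem.List.pyGetD_natCast, Bool.and_eq_true, beq_iff_eq]
  constructor
  · rintro ⟨i, hi, h1, h2⟩
    refine ⟨(tokens.zip infl)[i]'(by simp [List.length_zip]; omega), List.getElem_mem _, ?_⟩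
    rw [List.getElem_zip]
    rw [List.getD_eq_getElem tokens "" hi] at h1
    rw [List.getD_eq_getElem infl 0 (by omega)] at h2
    exact ⟨h1, h2⟩
  · rintro ⟨p, hp, h1, h2⟩
    obtain ⟨i, hi, rfl⟩ := List.mem_iff_getElem.mp hp
    rw [List.getElem_zip] at h1 h2
    have hi' : i < tokens.length := by simp [List.length_zip] at hi; omega
    refine ⟨i, hi', ?_, ?_⟩
    · rw [List.getD_eq_getElem tokens "" hi']; exact h1
    · rw [List.getD_eq_getElem infl 0 (by omega)]; exact h2

lemma pvStripArg_eq (rest : List String) :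
    ((PySem.List.slice (pvInfl 0 ("(" :: rest)) (some 1) (some (-1))).map (fun v => v - 1))
      = pvInfl 0 (PySem.List.slice ("(" :: rest) (some 1) (some (-1))) := by
  rw [pvSlice_cons]
  rw [show pvInfl 0 ("(" :: rest) = (0 + 1) :: pvInfl (0 + 1) rest by
    rw [pvInfl_cons]; simp]
  rw [pvSlice_cons, pvInfl_dropLast, pvInfl_shift rest (0 + 1), ← List.map_dropLast,
    List.map_map]
  have : ((fun v => v - 1) ∘ fun v => v + (0 + 1) : Int → Int) = id := by
    funext v; simp
  rw [this, List.map_id]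

lemma pvDetF_eq : ∀ (fuel1 fuel2 : Nat) (tokens : List String),
    tokens.length < fuel1 → tokens.length < fuel2 →
    pvDetermineF fuel1 tokens = pvStripBF fuel2 tokens (pvInfl 0 tokens) := by
  intro fuel1
  induction fuel1 with
  | zero => intro fuel2 tokens h1 h2; omega
  | succ f ih =>
    intro fuel2 tokens h1 h2
    cases fuel2 with
    | zero => omega
    | succ f2 =>
      simp only [pvDetermineF, pvStripBF]
      cases hmin : PySem.List.min? (pvInfl 0 tokens) (fun x => x) with
      | none => rfl
      | some m =>
        dsimp only
        by_cases hm : 0 < m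
        · rw [if_pos hm, if_neg (by omega : ¬ m ≤ 0)]
          have hcond : (m == 1 && (PySem.List.pyRange 0 (tokens.length : Int) 1).any
                (fun i => PySem.List.pyGetD tokens i "" == "," && PySem.List.pyGetD (pvInfl 0 tokens) i 0 == m))
              = (m == 1 && (tokens.zip (pvInfl 0 tokens)).any (fun p => p.1 == "," && p.2 == 1)) := by
            by_cases h1' : m = 1
            · subst h1'; rw [pvCommaAny tokens _ (pvInfl_length 0 tokens)]
            · rw [show (m == 1) = false from beq_eq_false_iff_ne.mpr h1']
              simp
          rw [hcond]
          by_cases hc : (m == 1 && (tokens.zip (pvInfl 0 tokens)).any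
              (fun p => p.1 == "," && p.2 == 1)) = true
          · rw [if_pos hc, if_pos hc]
          · rw [if_neg hc, if_neg hc]
            obtain ⟨rest, rfl⟩ := pvHead_paren tokens m hmin hm
            rw [pvStripArg_eq rest]
            have hlen : (PySem.List.slice ("(" :: rest) (some 1) (some (-1))).length
                < ("(" :: rest).length := pvSlice_len_lt _ (by simp)
            exact ih f2 _ (by omega) (by omega)
        · rw [if_neg hm, if_pos (by omega : m ≤ 0)]

lemma pvDet_eq (tokens : List String) :
    pvDetermine tokens = pvStripB tokens (pvInfl 0 tokens) := by
  unfold pvDetermine pvStripB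
  rw [pvInfl_length]
  exact pvDetF_eq _ _ tokens (Nat.lt_succ_self _) (Nat.lt_succ_self _)

lemma pvDetF_infl : ∀ (fuel : Nat) (tokens toks : List String) (m : Int) (infl : List Int),
    pvDetermineF fuel tokens = some (toks, m, infl) → infl = pvInfl 0 toks := by
  intro fuel
  induction fuel with
  | zero => intro tokens toks m infl h; simp [pvDetermineF] at h
  | succ f ih =>
    intro tokens toks m infl h
    simp only [pvDetermineF] at h
    cases hmin : PySem.List.min? (pvInfl 0 tokens) (fun x => x) with
    | none => rw [hmin] at h; simp at h
    | some m' =>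
      rw [hmin] at h
      dsimp only at h
      by_cases hm : 0 < m'
      · rw [if_pos hm] at h
        by_cases hc : (m' == 1 && (PySem.List.pyRange 0 (tokens.length : Int) 1).any
            (fun i => PySem.List.pyGetD tokens i "" == "," && PySem.List.pyGetD (pvInfl 0 tokens) i 0 == m')) = true
        · rw [if_pos hc] at h
          simp only [Option.some.injEq, Prod.mk.injEq] at h
          obtain ⟨h1, -, h3⟩ := h
          subst h1; exact h3.symm
        · rw [if_neg hc] at h
          exact ih _ toks m infl h
      · rw [if_neg hm] at h
        simp only [Option.some.injEq, Prod.mk.injEq] at h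
        obtain ⟨h1, -, h3⟩ := h
        subst h1; exact h3.symm

-- ---- Step 2: both operator scans compute the same "best candidate" ----

-- rank of a token: index of the first priority group containing it
def pvRnk : List (List String) → String → Option Nat
  | [], _ => none
  | g :: gs, t => if g.contains t then some 0 else (pvRnk gs t).map (· + 1)

-- candidates as (position, token, influence), built left to right
def pvEnumZ : Int → List (String × Int) → List (Int × String × Int)
  | _, [] => []
  | p, (t, v) :: ps => (p, t, v) :: pvEnumZ (p + 1) ps

-- one update of the running best (head of the list wins ties)
def pvStep (rnk : String → Option Nat) (m : Int) (x : Int × String × Int)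
    (B : Option (Nat × String × Int)) : Option (Nat × String × Int) :=
  if x.2.2 == m then
    match rnk x.2.1 with
    | none => B
    | some r =>
      match B with
      | none => some (r, x.2.1, x.1)
      | some bb => if r ≤ bb.1 then some (r, x.2.1, x.1) else B
  else B

def pvBestA (rnk : String → Option Nat) (m : Int) :
    List (Int × String × Int) → Option (Nat × String × Int) → Option (Nat × String × Int)
  | [], B => B
  | x :: xs, B => pvStep rnk m x (pvBestA rnk m xs B)

-- A's group loop, rephrased on the candidate list
def pvAFind (m : Int) : List (List String) → List (Int × String × Int) → Option (Option String × Int)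
  | [], _ => none
  | g :: gs, R =>
    match R.find? (fun x => g.contains x.2.1 && x.2.2 == m) with
    | some x => some (some x.2.1, x.1)
    | none => pvAFind m gs R

lemma pvFindOp_eq (toks : List String) (infl : List Int) (m : Int) (group : List String) (pos : Int) :
    ∀ group', pvFindOp toks infl m group pos group'
      = if group.contains (PySem.List.pyGetD toks pos "")
           && group'.contains (PySem.List.pyGetD toks pos "")
           && (PySem.List.pyGetD infl pos 0 == m)
        then some (some (PySem.List.pyGetD toks pos ""), pos) else none := by
  intro group'
  induction group' with
  | nil => simp [pvFindOp]
  | cons op rest ih =>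
    simp only [pvFindOp, ih]
    by_cases hg : PySem.List.pyGetD toks pos "" ∈ group <;>
      by_cases hv : PySem.List.pyGetD infl pos 0 = m <;>
        by_cases ht : PySem.List.pyGetD toks pos "" = op <;>
          simp_all

lemma pvScanGroup_eq (toks : List String) (infl : List Int) (m : Int) (g : List String) :
    ∀ is, pvScanGroup toks infl m g is
      = ((is.map (fun i => ((toks.length : Int) - 1 - i,
            PySem.List.pyGetD toks ((toks.length : Int) - 1 - i) "",
            PySem.List.pyGetD infl ((toks.length : Int) - 1 - i) 0))).find?
          (fun x => g.contains x.2.1 && x.2.2 == m)).map (fun x => (some x.2.1, x.1)) := by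
  intro is
  induction is with
  | nil => simp [pvScanGroup]
  | cons i is ih =>
    simp only [pvScanGroup, List.map_cons, List.find?_cons]
    rw [pvFindOp_eq]
    by_cases hgc : PySem.List.pyGetD toks ((toks.length : Int) - 1 - i) "" ∈ g <;>
      by_cases hv : PySem.List.pyGetD infl ((toks.length : Int) - 1 - i) 0 = m <;>
        first
        | (simp [hgc, hv, ih, List.find?_map, Option.map_map, Function.comp]; done)
        | (rw [show (PySem.List.pyGetD infl ((toks.length : Int) - 1 - i) 0 == m) = false from
             beq_eq_false_iff_ne.mpr hv]
           simp [hgc, ih, List.find?_map, Option.map_map, Function.comp])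

lemma pvEnumZ_length (ps : List (String × Int)) : ∀ p, (pvEnumZ p ps).length = ps.length := by
  induction ps with
  | nil => intro p; rfl
  | cons x ps ih => intro p; obtain ⟨t, v⟩ := x; simp [pvEnumZ, ih]

lemma pvEnumZ_getElem (ps : List (String × Int)) :
    ∀ (p : Int) (k : Nat) (h : k < ps.length),
      (pvEnumZ p ps)[k]'(by rw [pvEnumZ_length]; exact h) = (p + k, ps[k]) := by
  induction ps with
  | nil => intro p k h; simp at h
  | cons x ps ih =>
    intro p k h
    obtain ⟨t, v⟩ := x
    cases k with
    | zero => simp [pvEnumZ]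
    | succ k =>
      have hk : k < ps.length := by simpa using h
      have := ih (p + 1) k hk
      simp only [pvEnumZ, List.getElem_cons_succ, this]
      refine Prod.ext ?_ rfl
      push_cast; omega

lemma pvCands_eq (toks : List String) (infl : List Int) (hl : infl.length = toks.length) :
    (PySem.List.pyRange 0 (toks.length : Int) 1).map
        (fun i => ((toks.length : Int) - 1 - i,
          PySem.List.pyGetD toks ((toks.length : Int) - 1 - i) "",
          PySem.List.pyGetD infl ((toks.length : Int) - 1 - i) 0))
      = (pvEnumZ 0 (toks.zip infl)).reverse := by
  apply List.ext_getElem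
  · simp [PySem.List.length_pyRange_one, pvEnumZ_length, hl]
  · intro k h1 h2
    have hn : k < toks.length := by
      simpa [PySem.List.length_pyRange_one] using h1
    have hzlen : (toks.zip infl).length = toks.length := by simp [List.length_zip, hl]
    have hrange : k < (PySem.List.pyRange 0 (toks.length : Int) 1).length := by
      simpa [PySem.List.length_pyRange_one] using hn
    rw [List.getElem_map, PySem.List.getElem_pyRange_one _ _ _ hrange]
    have hidx : (toks.length : Int) - 1 - (0 + (k : Int)) = ((toks.length - 1 - k : Nat) : Int) := by
      push_cast; omega
    have hlt : toks.length - 1 - k < toks.length := by omega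
    rw [List.getElem_reverse]
    have hlt2 : (pvEnumZ 0 (toks.zip infl)).length - 1 - k < (toks.zip infl).length := by
      rw [pvEnumZ_length]; omega
    have henum := pvEnumZ_getElem (toks.zip infl) 0 ((pvEnumZ 0 (toks.zip infl)).length - 1 - k) hlt2
    rw [henum]
    have hidx2 : (pvEnumZ 0 (toks.zip infl)).length - 1 - k = toks.length - 1 - k := by
      rw [pvEnumZ_length, hzlen]
    rw [List.getElem_zip]
    refine Prod.ext ?_ (Prod.ext ?_ ?_)
    · simp only [hidx, hidx2]; push_cast; omega
    · simp only [hidx, PySem.List.pyGetD_natCast]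
      rw [List.getD_eq_getElem toks "" hlt]
      simp [hidx2]
    · simp only [hidx, PySem.List.pyGetD_natCast]
      rw [List.getD_eq_getElem infl 0 (by omega)]
      simp [hidx2]

lemma pvScanGroups_eq (toks : List String) (infl : List Int) (m : Int)
    (hl : infl.length = toks.length) :
    ∀ gs, pvScanGroups toks infl m gs = pvAFind m gs ((pvEnumZ 0 (toks.zip infl)).reverse) := by
  intro gs
  induction gs with
  | nil => simp [pvScanGroups, pvAFind]
  | cons g gs ih =>
    simp only [pvScanGroups, pvAFind]
    rw [pvScanGroup_eq, pvCands_eq toks infl hl]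
    cases (( (pvEnumZ 0 (toks.zip infl)).reverse).find?
        (fun x => g.contains x.2.1 && x.2.2 == m)) with
    | none => simpa using ih
    | some x => simp

lemma pvBestA_none_of (rnk : String → Option Nat) (m : Int) (h : ∀ t, rnk t = none) :
    ∀ R, pvBestA rnk m R none = none := by
  intro R
  induction R with
  | nil => rfl
  | cons x xs ih => simp [pvBestA, pvStep, ih, h x.2.1]

lemma pvBestA_rank0 (rnk : String → Option Nat) (m : Int) :
    ∀ (R : List (Int × String × Int)) (x0 : Int × String × Int),
      R.find? (fun x => (rnk x.2.1 == some 0) && (x.2.2 == m)) = some x0 →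
      pvBestA rnk m R none = some (0, x0.2.1, x0.1) := by
  intro R
  induction R with
  | nil => intro x0 hf; simp at hf
  | cons x xs ih =>
    intro x0 hf
    by_cases hP : ((rnk x.2.1 == some 0) && (x.2.2 == m)) = true
    · rw [List.find?_cons_of_pos (p := fun (y : Int × String × Int) => (rnk y.2.1 == some 0) && (y.2.2 == m)) (by simpa using hP)] at hf
      obtain rfl : x = x0 := by simpa using hf
      obtain ⟨h0, hm⟩ := Bool.and_eq_true_iff.mp hP
      simp only [pvBestA, pvStep, hm, beq_iff_eq.mp h0]
      cases pvBestA rnk m xs none with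
      | none => simp
      | some bb => simp [Nat.zero_le]
    · rw [List.find?_cons_of_neg (p := fun (y : Int × String × Int) => (rnk y.2.1 == some 0) && (y.2.2 == m)) (by simpa using hP)] at hf
      have := ih x0 hf
      simp only [pvBestA, pvStep, this]
      by_cases hm : (x.2.2 == m) = true
      · rw [hm]
        cases hr : rnk x.2.1 with
        | none => simp [this]
        | some r =>
          have hrne : r ≠ 0 := by
            intro h0; rw [h0] at hr
            rw [hr] at hP; simp [hm] at hP
          simp [this, Nat.le_zero, hrne]
      · rw [Bool.not_eq_true] at hm
        simp [hm]

lemma pvBestA_shift (rnk1 rnk2 : String → Option Nat) (m : Int) :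
    ∀ (R : List (Int × String × Int)),
      (∀ x ∈ R, x.2.2 = m → rnk1 x.2.1 = (rnk2 x.2.1).map (· + 1)) →
      pvBestA rnk1 m R none = (pvBestA rnk2 m R none).map (fun b => (b.1 + 1, b.2)) := by
  intro R
  induction R with
  | nil => intro _; rfl
  | cons x xs ih =>
    intro hsh
    have ihx := ih (fun y hy => hsh y (List.mem_cons_of_mem _ hy))
    simp only [pvBestA, pvStep, ihx]
    by_cases hm : (x.2.2 == m) = true
    · rw [hm]
      rw [hsh x List.mem_cons_self (beq_iff_eq.mp hm)]
      cases hr : rnk2 x.2.1 with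
      | none => simp
      | some r =>
        cases hb : pvBestA rnk2 m xs none with
        | none => simp
        | some bb =>
          simp only [Option.map_some, Option.map_map]
          by_cases hle : r ≤ bb.1
          · simp [hle, show r + 1 ≤ bb.1 + 1 from by omega]
          · simp [hle, show ¬ (r + 1 ≤ bb.1 + 1) from by omega]
    · rw [Bool.not_eq_true] at hm
      simp [hm]

lemma pvAFind_eq_best (m : Int) :
    ∀ (gs : List (List String)) (R : List (Int × String × Int)),
      pvAFind m gs R
        = (pvBestA (pvRnk gs) m R none).map (fun b => ((some b.2.1 : Option String), b.2.2)) := by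
  intro gs
  induction gs with
  | nil =>
    intro R
    rw [pvBestA_none_of (pvRnk []) m (fun t => rfl) R]
    rfl
  | cons g gs ih =>
    intro R
    simp only [pvAFind]
    have hpred : (fun (x : Int × String × Int) => g.contains x.2.1 && x.2.2 == m)
        = (fun x => (pvRnk (g :: gs) x.2.1 == some 0) && (x.2.2 == m)) := by
      funext x
      by_cases hc : x.2.1 ∈ g
      · simp [pvRnk, hc]
      · simp only [pvRnk, hc, if_neg]
        cases pvRnk gs x.2.1 <;> simp [hc]
    cases hf : R.find? (fun x => g.contains x.2.1 && x.2.2 == m) with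
    | some x =>
      rw [pvBestA_rank0 (pvRnk (g :: gs)) m R x (by rw [← hpred]; exact hf)]
      rfl
    | none =>
      rw [ih R]
      rw [pvBestA_shift (pvRnk (g :: gs)) (pvRnk gs) m R ?hsh]
      · rw [Option.map_map]; rfl
      case hsh =>
        intro x hx hxm
        have hnc := List.find?_eq_none.mp hf x hx
        have hgc : x.2.1 ∉ g := by
          intro hmem; exact hnc (by simp [hmem, hxm])
        simp [pvRnk, hgc]

-- ---- Step 3: the dict of priorities realises pvRnk ----

lemma pvGetAppendSingle :
    ∀ (l : List (String × Int)) (k : String) (v : Int) (k' : String),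
      (PySem.Dict.mk (l ++ [(k, v)])).get? k'
        = ((PySem.Dict.mk l).get? k').or (if k' = k then some v else none) := by
  intro l
  induction l with
  | nil =>
    intro k v k'
    rw [List.nil_append, PySem.Dict.get?_mk_cons]
    have hnil : (PySem.Dict.mk ([] : List (String × Int))).get? k' = none := rfl
    by_cases h : k' = k
    · subst h; simp [hnil]
    · rw [show (k == k') = false from beq_eq_false_iff_ne.mpr (Ne.symm h)]
      simp [h, hnil]
  | cons a l ih =>
    intro k v k'
    obtain ⟨ak, av⟩ := a
    rw [List.cons_append, PySem.Dict.get?_mk_cons, PySem.Dict.get?_mk_cons, ih]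
    by_cases h : ak = k'
    · rw [show (ak == k') = true from beq_iff_eq.mpr h]; simp
    · rw [show (ak == k') = false from beq_eq_false_iff_ne.mpr h]
      simp

lemma pvSetdefault_get? (d : PySem.Dict String Int) (k k' : String) (v : Int) :
    PySem.Dict.get? (PySem.Dict.setdefault d k v) k'
      = (PySem.Dict.get? d k').or (if k' = k then some v else none) := by
  unfold PySem.Dict.setdefault
  by_cases hc : d.contains k = true
  · rw [if_pos hc]
    by_cases h : k' = k
    · subst h
      rw [PySem.Dict.contains_eq_isSome_get?] at hc
      cases hg : d.get? k' with
      | none => rw [hg] at hc; simp at hc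
      | some x => simp
    · simp [h]
  · rw [if_neg hc]
    have : d = PySem.Dict.mk d.items := rfl
    rw [this, pvGetAppendSingle d.items k v k']

lemma pvFoldSetdefault (r : Int) :
    ∀ (g : List String) (d : PySem.Dict String Int) (t : String),
      PySem.Dict.get? (g.foldl (fun d op => PySem.Dict.setdefault d op r) d) t
        = (PySem.Dict.get? d t).or (if g.contains t then some r else none) := by
  intro g
  induction g with
  | nil => intro d t; simp
  | cons op g ih =>
    intro d t
    rw [List.foldl_cons, ih, pvSetdefault_get?, List.contains_cons]
    by_cases h : t = op
    · subst h
      cases PySem.Dict.get? d t <;> simp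
    · rw [show (t == op) = false from beq_eq_false_iff_ne.mpr h]
      simp [h]

lemma pvBuildRank_get? :
    ∀ (gs : List (List String)) (d : PySem.Dict String Int) (r : Int) (t : String),
      PySem.Dict.get? (pvBuildRank d r gs) t
        = (PySem.Dict.get? d t).or ((pvRnk gs t).map (fun k => r + (k : Int))) := by
  intro gs
  induction gs with
  | nil => intro d r t; simp [pvBuildRank, pvRnk]
  | cons g gs ih =>
    intro d r t
    simp only [pvBuildRank]
    rw [ih, pvFoldSetdefault]
    by_cases hc : t ∈ g
    · have hct : g.contains t = true := by simpa using hc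
      rw [hct]
      simp only [pvRnk]
      cases PySem.Dict.get? d t <;> simp [hc]
    · have hct : g.contains t = false := by simpa using hc
      rw [hct]
      simp only [pvRnk]
      cases pvRnk gs t <;> cases PySem.Dict.get? d t <;> simp [hc] <;> omega

lemma pvRank_get (prio : List (List String)) (t : String) :
    PySem.Dict.get? (pvBuildRank PySem.Dict.empty 0 prio) t
      = (pvRnk prio t).map (fun k => (k : Int)) := by
  rw [pvBuildRank_get?]
  cases pvRnk prio t <;> simp

-- ---- Step 4: B's single scan computes pvBestA ----

lemma pvBestA_append (rnk : String → Option Nat) (m : Int) :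
    ∀ (l : List (Int × String × Int)) (x : Int × String × Int) (B : Option (Nat × String × Int)),
      pvBestA rnk m (l ++ [x]) B = pvBestA rnk m l (pvStep rnk m x B) := by
  intro l
  induction l with
  | nil => intro x B; rfl
  | cons y l ih => intro x B; simp only [List.cons_append, pvBestA, ih]

lemma pvScanB_eq (prio : List (List String)) (m : Int) :
    ∀ (ps : List (String × Int)) (pos : Int) (B : Option (Nat × String × Int)),
      pvScanB (pvBuildRank PySem.Dict.empty 0 prio) m ps pos (B.map (fun x => ((x.1 : Int), x.2)))
        = (pvBestA (pvRnk prio) m (pvEnumZ pos ps).reverse B).map (fun x => ((x.1 : Int), x.2)) := by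
  intro ps
  induction ps with
  | nil => intro pos B; rfl
  | cons x ps ih =>
    intro pos B
    obtain ⟨t, v⟩ := x
    simp only [pvScanB, pvEnumZ, List.reverse_cons]
    rw [pvBestA_append]
    have hb : (if v == m && PySem.Dict.contains (pvBuildRank PySem.Dict.empty 0 prio) t then
          match PySem.Dict.get? (pvBuildRank PySem.Dict.empty 0 prio) t with
          | some r =>
            match B.map (fun x => ((x.1 : Int), x.2)) with
            | none => some (r, t, pos)
            | some b => if r ≤ b.1 then some (r, t, pos) else B.map (fun x => ((x.1 : Int), x.2))
          | none => B.map (fun x => ((x.1 : Int), x.2))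
        else B.map (fun x => ((x.1 : Int), x.2)))
        = (pvStep (pvRnk prio) m ((pos, t, v) : Int × String × Int) B).map
            (fun x => ((x.1 : Int), x.2)) := by
      rw [PySem.Dict.contains_eq_isSome_get?, pvRank_get prio t]
      cases hr : pvRnk prio t with
      | none => simp [pvStep, hr]
      | some rn =>
        by_cases hv : (v == m) = true
        · cases B with
          | none => simp [pvStep, hr, hv]
          | some bb =>
            by_cases hle : rn ≤ bb.1
            · simp [pvStep, hr, hv, hle]
            · simp [pvStep, hr, hv, hle]
        · rw [Bool.not_eq_true] at hv
          simp [pvStep, hr, hv]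
    rw [hb]
    exact ih (pos + 1) (pvStep (pvRnk prio) m (pos, t, v) B)

-- ---- Step 5: assembly ----

lemma pvGood_eq (ops : List String) (toks : List String) :
    toks.foldl (fun good token => if ops.contains token then true else good) false
      = toks.any (fun t => ops.contains t) := by
  have gen : ∀ (l : List String) (b : Bool),
      l.foldl (fun good token => if ops.contains token then true else good) b
        = (b || l.any (fun t => ops.contains t)) := by
    intro l
    induction l with
    | nil => intro b; simp
    | cons t l ih =>
      intro b
      rw [List.foldl_cons, List.any_cons, ih]
      by_cases h : ops.contains t = true <;> cases b <;> simp [h]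
  simpa using gen toks false

lemma pv_main (tokens operators : List String) (operators_priority : List (List String)) :
    search_min_priority tokens operators operators_priority
      = search_min_priority_alt tokens operators operators_priority := by
  unfold search_min_priority search_min_priority_alt
  rw [pvDet_eq]
  cases hd : pvStripB tokens (pvInfl 0 tokens) with
  | none => rfl
  | some trip =>
    obtain ⟨toks, m, infl⟩ := trip
    have hdet : pvDetermine tokens = some (toks, m, infl) := by rw [pvDet_eq]; exact hd
    have hinfl : infl = pvInfl 0 toks := pvDetF_infl _ tokens toks m infl hdet
    have hl : infl.length = toks.length := by rw [hinfl, pvInfl_length]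
    dsimp only
    rw [pvGood_eq]
    by_cases hg : toks.any (fun t => operators.contains t) = false
    · rw [if_pos hg, if_pos hg]
    · rw [if_neg hg, if_neg hg]
      rw [pvScanGroups_eq toks infl m hl operators_priority, pvAFind_eq_best]
      have hscan := pvScanB_eq operators_priority m (toks.zip infl) 0 none
      simp only [Option.map_none] at hscan
      rw [hscan]
      cases pvBestA (pvRnk operators_priority) m (pvEnumZ 0 (toks.zip infl)).reverse none with
      | none => rfl
      | some b => rfl

-- ===== VERDICT (by name: the statement is the Claim_ definition above) =====
theorem search_min_priority_spec : Claim_equal_search_min_priority := by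
  intro tokens operators operators_priority _ _
  unfold Spec_search_min_priority
  exact pv_main tokens operators operators_priority
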